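-- pv_equiv track=rewrite | github.com/pecalleja/PythonLocalDevelopment | src/codesignal/dynamic/knight_moves.py | solution
-- ===== SOURCE A (Python) =====
-- from collections import deque
--
-- def solution(board, start, end):
--     n = len(board)
--     m = len(board[0])
--
--     start_row, start_col = start
--     end_row, end_col = end
--
--     directions = [
--         (-2, -1),
--         (-2, 1),
--         (-1, -2),
--         (-1, 2),
--         (1, -2),
--         (1, 2),
--         (2, -1),
--         (2, 1),
--     ]
--
--     visited = [[False for _ in range(m)] for _ in range(n)]
--     visited[start_row][start_col] = True
--
--     queue = deque()
--     queue.append((start_row, start_col, 0))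
--
--     while queue:
--         current_row, current_col, distance = queue.popleft()
--
--         if (current_row, current_col) == (end_row, end_col):
--             return distance
--
--         for dr, dc in directions:
--             neighbor_row = current_row + dr
--             neighbor_col = current_col + dc
--
--             if 0 <= neighbor_row < n and 0 <= neighbor_col < m:
--                 if not visited[neighbor_row][neighbor_col]:
--                     visited[neighbor_row][neighbor_col] = True
--                     queue.append((neighbor_row, neighbor_col, distance + 1))
--
--     return -1
-- ===== SOURCE B (Python) =====
-- def solution(board, start, end):
--     n = len(board)
--     m = len(board[0])
--     sr, sc = start
--     er, ec = end
--     if not (0 <= sr < n and 0 <= sc < m):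
--         raise ValueError("start is not a board cell")
--     if (sr, sc) == (er, ec):
--         return 0
--     if not (0 <= er < n and 0 <= ec < m):
--         return -1
--     moves = [(-2, -1), (-2, 1), (-1, -2), (-1, 2), (1, -2), (1, 2), (2, -1), (2, 1)]
--     # bidirectional BFS: the two searches grow alternately; 'seen_s/front_s' is
--     # always the side about to be expanded, the roles swap after each expansion.
--     seen_s = {(sr, sc)}
--     seen_e = {(er, ec)}
--     front_s = [(sr, sc)]
--     front_e = [(er, ec)]
--     dist_s = 0
--     dist_e = 0
--     while front_s and front_e:
--         nxt = []
--         for r, c in front_s: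
--             for dr, dc in moves:
--                 p = (r + dr, c + dc)
--                 if 0 <= p[0] < n and 0 <= p[1] < m and p not in seen_s:
--                     if p in seen_e:
--                         return dist_s + 1 + dist_e
--                     seen_s.add(p)
--                     nxt.append(p)
--         front_s = nxt
--         dist_s += 1
--         seen_s, seen_e = seen_e, seen_s
--         front_s, front_e = front_e, front_s
--         dist_s, dist_e = dist_e, dist_s
--     return -1
-- ===== Notes on version B (the rewrite author's own statement) =====
-- stated objective: alternative
-- what changed: Replaces the single-source deque BFS by a bidirectional BFS: two searches grow alternately from start and from end, and the answer is dist_s+1+dist_e as soon as one side generates a fresh cell already in the other side's visited set (-1 when a frontier dies out).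
-- outside the precondition, e.g. on solution([[0, 0], [0, 0]], (-1, 0), (1, 1)): A returns 1, B raises ValueError; on solution([[0, 0], [0, 0]], (-1, 0), (-1, 0)): A returns 0, B raises ValueError
import Mathlib
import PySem

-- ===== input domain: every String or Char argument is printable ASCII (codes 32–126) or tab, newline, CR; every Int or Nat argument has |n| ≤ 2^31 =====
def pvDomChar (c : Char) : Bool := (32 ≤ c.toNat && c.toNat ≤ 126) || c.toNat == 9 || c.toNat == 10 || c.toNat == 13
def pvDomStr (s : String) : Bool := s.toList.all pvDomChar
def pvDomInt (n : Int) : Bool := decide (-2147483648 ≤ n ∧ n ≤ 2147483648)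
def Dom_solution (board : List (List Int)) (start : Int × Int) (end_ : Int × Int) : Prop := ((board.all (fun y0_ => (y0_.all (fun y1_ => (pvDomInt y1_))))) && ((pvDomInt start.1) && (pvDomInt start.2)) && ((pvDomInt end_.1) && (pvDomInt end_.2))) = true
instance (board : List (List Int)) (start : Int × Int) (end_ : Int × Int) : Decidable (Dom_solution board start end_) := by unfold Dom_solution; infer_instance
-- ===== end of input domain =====

-- B replaces A's single-source deque BFS by a bidirectional BFS (two searches grow
-- alternately from start and from end and meet in the middle); equivalence is proved
-- by showing both return the least knight-move distance (or -1).


-- ===== PORT A =====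
-- the literal `directions` list of A
def knightDirs : List (Int × Int) :=
  [(-2,-1),(-2,1),(-1,-2),(-1,2),(1,-2),(1,2),(2,-1),(2,1)]

-- visited[r][c] read for the loop's guarded (0 ≤ r < n, 0 ≤ c < m) indices; the
-- out-of-shape default `true` is never read on those indices
def visGet (vis : List (List Bool)) (r c : Int) : Bool :=
  (vis.getD r.toNat []).getD c.toNat true

-- visited[r][c] = True for the loop's guarded nonnegative in-range indices
def visSet (vis : List (List Bool)) (r c : Int) : List (List Bool) :=
  vis.modify r.toNat (fun row => row.set c.toNat true)

-- visited[start_row][start_col] = True with Python's negative-index wraparound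
-- (exact for -len ≤ i < len, which Pre_solution guarantees)
def pySetTrue (vis : List (List Bool)) (r c : Int) : List (List Bool) :=
  vis.modify (if r < 0 then r + (vis.length : Int) else r).toNat (fun row =>
    row.set (if c < 0 then c + (row.length : Int) else c).toNat true)

def countFalse (vis : List (List Bool)) : Nat :=
  (vis.map (fun row => row.count false)).sum

-- the body of A's `for dr, dc in directions` loop
def stepA (n m dist : Int) (rc : Int × Int)
    (st : List (List Bool) × List (Int × Int × Int)) (d : Int × Int) :
    List (List Bool) × List (Int × Int × Int) :=
  let nr := rc.1 + d.1
  let nc := rc.2 + d.2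
  if 0 ≤ nr ∧ nr < n ∧ 0 ≤ nc ∧ nc < m then
    if visGet st.1 nr nc = false then
      (visSet st.1 nr nc, st.2 ++ [(nr, nc, dist + 1)])
    else st
  else st

theorem count_set_true (row : List Bool) (c : Nat) (h : row.getD c true = false) :
    (row.set c true).count false + 1 = row.count false := by
  induction row generalizing c with
  | nil => simp at h
  | cons b t ih =>
    cases c with
    | zero =>
      simp only [List.getD, List.getElem?_cons_zero, Option.getD_some] at h
      simp [h]
    | succ c =>
      simp only [List.getD_cons_succ] at h
      have := ih c h
      simp only [List.set_cons_succ, List.count_cons]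
      omega

theorem countFalse_modify (vis : List (List Bool)) (i j : Nat)
    (h : (vis.getD i []).getD j true = false) :
    countFalse (vis.modify i (fun row => row.set j true)) + 1 = countFalse vis := by
  induction vis generalizing i with
  | nil => simp at h
  | cons row t ih =>
    cases i with
    | zero =>
      simp only [List.getD, List.getElem?_cons_zero, Option.getD_some] at h
      simp only [List.modify_zero_cons, countFalse, List.map_cons, List.sum_cons]
      have := count_set_true row j h
      omega
    | succ i =>
      simp only [List.getD_cons_succ] at h
      have := ih i h
      simp only [List.modify_succ_cons, countFalse, List.map_cons, List.sum_cons] at *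
      omega

theorem countFalse_visSet (vis : List (List Bool)) (r c : Int)
    (h : visGet vis r c = false) :
    countFalse (visSet vis r c) + 1 = countFalse vis := by
  exact countFalse_modify vis r.toNat c.toNat h

theorem measureA_step (n m dist : Int) (rc : Int × Int)
    (st : List (List Bool) × List (Int × Int × Int)) (d : Int × Int) :
    9 * countFalse (stepA n m dist rc st d).1 + (stepA n m dist rc st d).2.length
      ≤ 9 * countFalse st.1 + st.2.length := by
  dsimp only [stepA]
  split_ifs with h1 h2
  · have := countFalse_visSet st.1 (rc.1 + d.1) (rc.2 + d.2) h2
    simp only [List.length_append, List.length_cons, List.length_nil]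
    omega
  · exact Nat.le_refl _
  · exact Nat.le_refl _

theorem measureA_fold (n m dist : Int) (rc : Int × Int) (ds : List (Int × Int))
    (st : List (List Bool) × List (Int × Int × Int)) :
    9 * countFalse ((ds.foldl (stepA n m dist rc) st).1)
      + ((ds.foldl (stepA n m dist rc) st).2).length
      ≤ 9 * countFalse st.1 + st.2.length := by
  induction ds generalizing st with
  | nil => exact Nat.le_refl _
  | cons d ds ih =>
    simp only [List.foldl_cons]
    exact Nat.le_trans (ih (stepA n m dist rc st d)) (measureA_step n m dist rc st d)

-- A's `while queue:` loop
def loopA (n m er ec : Int) (vis : List (List Bool)) (queue : List (Int × Int × Int)) : Int :=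
  match queue with
  | [] => -1
  | (r, c, dist) :: rest =>
    if r = er ∧ c = ec then dist
    else
      loopA n m er ec ((knightDirs.foldl (stepA n m dist (r, c)) (vis, rest)).1)
        ((knightDirs.foldl (stepA n m dist (r, c)) (vis, rest)).2)
termination_by 9 * countFalse vis + queue.length
decreasing_by
  have h := measureA_fold n m dist (r, c) knightDirs (vis, rest)
  simp only [List.length_cons] at *
  omega

def solution (board : List (List Int)) (start : Int × Int) (end_ : Int × Int) : Int :=
  let n : Int := board.length
  let m : Int := (PySem.List.pyGetD board 0 []).length
  let vis0 := (List.range n.toNat).map (fun _ => (List.range m.toNat).map (fun _ => false))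
  loopA n m end_.1 end_.2 (pySetTrue vis0 start.1 start.2) [(start.1, start.2, 0)]

-- ===== PORT B =====
-- the literal `moves` list of B
def knightMoves : List (Int × Int) :=
  [(-2,-1),(-2,1),(-1,-2),(-1,2),(1,-2),(1,2),(2,-1),(2,1)]

-- all board cells; used only for the termination measure of biLoop
def gridCells (n m : Int) : List (Int × Int) :=
  (List.range n.toNat).flatMap (fun i : Nat =>
    (List.range m.toNat).map (fun j : Nat => ((i : Int), (j : Int))))

def unvis (n m : Int) (V : List (Int × Int)) : Nat :=
  ((gridCells n m).filter (fun g => decide (g ∉ V))).length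

-- B's `for dr, dc in moves` loop over one frontier cell, with the early return
-- (`None`) when a fresh cell lies in the opposite side's visited set
def tryMoves (n m : Int) (seenS seenE : List (Int × Int)) (acc : List (Int × Int))
    (rc : Int × Int) : List (Int × Int) → Option (List (Int × Int) × List (Int × Int))
  | [] => some (seenS, acc)
  | d :: ds =>
    let p := (rc.1 + d.1, rc.2 + d.2)
    if 0 ≤ p.1 ∧ p.1 < n ∧ 0 ≤ p.2 ∧ p.2 < m ∧ p ∉ seenS then
      if p ∈ seenE then none
      else tryMoves n m (PySem.Set.add seenS p) seenE (acc ++ [p]) rc ds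
    else tryMoves n m seenS seenE acc rc ds

-- B's `for r, c in front_s` loop
def expandFront (n m : Int) (seenS seenE : List (Int × Int)) (acc : List (Int × Int)) :
    List (Int × Int) → Option (List (Int × Int) × List (Int × Int))
  | [] => some (seenS, acc)
  | rc :: rest =>
    match tryMoves n m seenS seenE acc rc knightMoves with
    | none => none
    | some (s', a') => expandFront n m s' seenE a' rest

theorem length_filter_lt {α : Type} (l : List α) (p : α → Bool) (x : α)
    (hx : x ∈ l) (hpx : p x = false) : (l.filter p).length < l.length := by
  induction l with
  | nil => cases hx
  | cons a t ih =>
    rcases List.mem_cons.mp hx with rfl | hx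
    · have := List.length_filter_le p t
      simp [hpx]
      omega
    · by_cases hpa : p a = true
      · have := ih hx
        simp only [List.filter_cons, hpa, if_true, List.length_cons]
        omega
      · have := ih hx
        simp [hpa]
        omega

theorem mem_gridCells (n m : Int) (p : Int × Int) :
    p ∈ gridCells n m ↔ 0 ≤ p.1 ∧ p.1 < n ∧ 0 ≤ p.2 ∧ p.2 < m := by
  constructor
  · intro h
    obtain ⟨i, hi, hmem⟩ := List.mem_flatMap.mp h
    obtain ⟨j, hj, rfl⟩ := List.mem_map.mp hmem
    rw [List.mem_range] at hi hj
    refine ⟨?_, ?_, ?_, ?_⟩ <;> simp <;> omega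
  · rintro ⟨h1, h2, h3, h4⟩
    exact List.mem_flatMap.mpr ⟨p.1.toNat, List.mem_range.mpr (by omega),
      List.mem_map.mpr ⟨p.2.toNat, List.mem_range.mpr (by omega),
        by simp [Int.toNat_of_nonneg h1, Int.toNat_of_nonneg h3]⟩⟩

theorem unvis_fresh (n m : Int) (V : List (Int × Int)) (p : Int × Int)
    (hg : p ∈ gridCells n m) (hv : p ∉ V) :
    unvis n m (V ++ [p]) < unvis n m V := by
  unfold unvis
  have hrw : (gridCells n m).filter (fun g => decide (g ∉ V ++ [p])) =
      ((gridCells n m).filter (fun g => decide (g ∉ V))).filter (fun g => !(g == p)) := by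
    rw [List.filter_filter]
    apply List.filter_congr
    intro g _
    by_cases h1 : g ∈ V <;> by_cases h2 : g = p <;> simp [h1, h2]
  rw [hrw]
  apply length_filter_lt _ _ p
  · simp only [List.mem_filter]
    exact ⟨hg, by simpa using hv⟩
  · simp

theorem tryMoves_measure (n m : Int) (E : List (Int × Int)) (rc : Int × Int) :
    ∀ (ds : List (Int × Int)) (S acc S' A' : List (Int × Int)),
    tryMoves n m S E acc rc ds = some (S', A') →
    2 * unvis n m S' + A'.length ≤ 2 * unvis n m S + acc.length := by
  intro ds
  induction ds with
  | nil =>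
    intro S acc S' A' h
    simp only [tryMoves] at h
    cases h
    exact Nat.le_refl _
  | cons d ds ih =>
    intro S acc S' A' h
    simp only [tryMoves] at h
    split_ifs at h with hg hE
    · have hfresh := unvis_fresh n m S (rc.1 + d.1, rc.2 + d.2)
        ((mem_gridCells n m _).mpr ⟨hg.1, hg.2.1, hg.2.2.1, hg.2.2.2.1⟩) hg.2.2.2.2
      rw [PySem.Set.add_of_not_mem hg.2.2.2.2] at h
      have := ih _ _ _ _ h
      simp only [List.length_append, List.length_cons, List.length_nil] at this
      omega
    · exact ih _ _ _ _ h

theorem expandFront_measure (n m : Int) (E : List (Int × Int)) :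
    ∀ (F : List (Int × Int)) (S acc S' F' : List (Int × Int)),
    expandFront n m S E acc F = some (S', F') →
    2 * unvis n m S' + F'.length ≤ 2 * unvis n m S + acc.length := by
  intro F
  induction F with
  | nil =>
    intro S acc S' F' h
    simp only [expandFront] at h
    cases h
    exact Nat.le_refl _
  | cons rc rest ih =>
    intro S acc S' F' h
    simp only [expandFront] at h
    rcases hm : tryMoves n m S E acc rc knightMoves with _ | ⟨S1, A1⟩
    · rw [hm] at h; cases h
    · rw [hm] at h
      exact Nat.le_trans (ih _ _ _ _ h) (tryMoves_measure n m E rc _ _ _ _ _ hm)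

-- B's `while front_s and front_e` loop; the two sides swap after every expansion
def biLoop (n m : Int) (Ss Fs Se Fe : List (Int × Int)) (ds de : Int) : Int :=
  if Fs = [] ∨ Fe = [] then -1
  else
    match h : expandFront n m Ss Se [] Fs with
    | none => ds + 1 + de
    | some (Ss', Fs') => biLoop n m Se Fe Ss' Fs' de (ds + 1)
termination_by 2 * unvis n m Ss + Fs.length + (2 * unvis n m Se + Fe.length)
decreasing_by
  rename_i hne
  have hm := expandFront_measure n m Se Fs Ss [] Ss' Fs' h
  have hf : Fs ≠ [] := fun hh => hne (Or.inl hh)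
  have : 0 < Fs.length := List.length_pos_iff.mpr hf
  simp only [List.length_nil] at hm
  omega

def solution_alt (board : List (List Int)) (start : Int × Int) (end_ : Int × Int) : Int :=
  let n : Int := board.length
  let m : Int := (PySem.List.pyGetD board 0 []).length
  if 0 ≤ start.1 ∧ start.1 < n ∧ 0 ≤ start.2 ∧ start.2 < m then
    if start = end_ then 0
    else if 0 ≤ end_.1 ∧ end_.1 < n ∧ 0 ≤ end_.2 ∧ end_.2 < m then
      biLoop n m (PySem.Set.ofList [(start.1, start.2)]) [(start.1, start.2)]
        (PySem.Set.ofList [(end_.1, end_.2)]) [(end_.1, end_.2)] 0 0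
    else -1
  else -1 -- Python B raises ValueError here; excluded by Pre_solution

-- ===== PRECONDITION & SPEC =====
-- Pre_ admits a nonempty board and an on-board start cell. Outside it A raises
-- IndexError, except for negative start indices in Python's wrap range, where A
-- returns an unmatchable artefact of negative-index wraparound (a BFS from a
-- phantom off-board cell whose visited mark lands on a wrapped board cell) while
-- B raises ValueError (it validates the start cell).
def Pre_solution (board : List (List Int)) (start : Int × Int) (end_ : Int × Int) : Prop :=
  board ≠ [] ∧
  0 ≤ start.1 ∧ start.1 < (board.length : Int) ∧
  0 ≤ start.2 ∧ start.2 < ((board.headD []).length : Int)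

instance (board : List (List Int)) (start : Int × Int) (end_ : Int × Int) :
    Decidable (Pre_solution board start end_) := by unfold Pre_solution; infer_instance

def pvWitness_solution : List (List Int) × (Int × Int) × (Int × Int) :=
  ([[0, 0, 0], [0, 0, 0], [0, 0, 0]], (0, 0), (2, 1))

def Spec_solution (board : List (List Int)) (start : Int × Int) (end_ : Int × Int) (out : Int) : Prop :=
  out = solution_alt board start end_

instance (board : List (List Int)) (start : Int × Int) (end_ : Int × Int) (out : Int) :
    Decidable (Spec_solution board start end_ out) := by unfold Spec_solution; infer_instance

-- ===== CLAIM (what is proved, stated in full; the proofs are below) =====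
def Claim_equal_solution : Prop := ∀ (board : List (List Int)) (start : Int × Int) (end_ : Int × Int), Dom_solution board start end_ → Pre_solution board start end_ → Spec_solution board start end_ (solution board start end_)

-- ===== LEMMAS AND PROOFS =====

-- ---- a level-synchronous single-source BFS, used only as a bridge between the
-- ---- two ports: A is shown to simulate it, and it is shown to compute the
-- ---- least knight distance.
def stepB (n m : Int) (rc : Int × Int)
    (st : List (Int × Int) × List (Int × Int)) (d : Int × Int) :
    List (Int × Int) × List (Int × Int) :=
  let p := (rc.1 + d.1, rc.2 + d.2)
  if 0 ≤ p.1 ∧ p.1 < n ∧ 0 ≤ p.2 ∧ p.2 < m ∧ p ∉ st.1 then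
    (PySem.Set.add st.1 p, st.2 ++ [p])
  else st

def cellB (n m : Int) (st : List (Int × Int) × List (Int × Int)) (rc : Int × Int) :
    List (Int × Int) × List (Int × Int) :=
  knightDirs.foldl (stepB n m rc) st

theorem measureB_dirs (n m : Int) (rc : Int × Int) (ds : List (Int × Int))
    (st : List (Int × Int) × List (Int × Int)) :
    2 * unvis n m (ds.foldl (stepB n m rc) st).1 + (ds.foldl (stepB n m rc) st).2.length
      ≤ 2 * unvis n m st.1 + st.2.length := by
  induction ds generalizing st with
  | nil => exact Nat.le_refl _
  | cons d ds ih =>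
    simp only [List.foldl_cons]
    refine Nat.le_trans (ih (stepB n m rc st d)) ?_
    dsimp only [stepB]
    split_ifs with h
    · rw [PySem.Set.add_of_not_mem h.2.2.2.2]
      have hfresh := unvis_fresh n m st.1 (rc.1 + d.1, rc.2 + d.2)
        ((mem_gridCells n m _).mpr ⟨h.1, h.2.1, h.2.2.1, h.2.2.2.1⟩) h.2.2.2.2
      simp only [List.length_append, List.length_cons, List.length_nil]
      omega
    · exact Nat.le_refl _

theorem measureB_cells (n m : Int) (F : List (Int × Int))
    (st : List (Int × Int) × List (Int × Int)) :
    2 * unvis n m (F.foldl (cellB n m) st).1 + (F.foldl (cellB n m) st).2.length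
      ≤ 2 * unvis n m st.1 + st.2.length := by
  induction F generalizing st with
  | nil => exact Nat.le_refl _
  | cons rc F ih =>
    simp only [List.foldl_cons]
    exact Nat.le_trans (ih (cellB n m st rc)) (measureB_dirs n m rc knightMoves st)

def bLoop (n m er ec : Int) (V frontier : List (Int × Int)) (dist : Int) : Int :=
  if frontier = [] then -1
  else if (er, ec) ∈ frontier then dist
  else
    bLoop n m er ec (frontier.foldl (cellB n m) (V, [])).1
      (frontier.foldl (cellB n m) (V, [])).2 (dist + 1)
termination_by 2 * unvis n m V + frontier.length
decreasing_by
  have h := measureB_cells n m frontier (V, [])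
  have hf : 0 < frontier.length := List.length_pos_iff.mpr (by assumption)
  simp only [List.foldl_attach, List.length_nil] at *
  omega

-- ---- simulation: A's deque BFS equals the level BFS ----
def matOf (n m : Int) (V : List (Int × Int)) : List (List Bool) :=
  (List.range n.toNat).map (fun i : Nat =>
    (List.range m.toNat).map (fun j : Nat => decide (((i : Int), (j : Int)) ∈ V)))

def enc (d : Int) (F : List (Int × Int)) : List (Int × Int × Int) :=
  F.map (fun p => (p.1, p.2, d))

theorem visGet_matOf (n m : Int) (V : List (Int × Int)) (r c : Int)
    (h : 0 ≤ r ∧ r < n ∧ 0 ≤ c ∧ c < m) :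
    visGet (matOf n m V) r c = decide ((r, c) ∈ V) := by
  simp only [visGet, matOf]
  rw [List.getD_eq_getElem (l := (List.range n.toNat).map _) (d := []) (by simp; omega)]
  simp only [List.getElem_map, List.getElem_range]
  rw [List.getD_eq_getElem (l := (List.range m.toNat).map _) (d := true) (by simp; omega)]
  simp only [List.getElem_map, List.getElem_range]
  rw [Int.toNat_of_nonneg h.1, Int.toNat_of_nonneg h.2.2.1]

theorem visSet_matOf (n m : Int) (V : List (Int × Int)) (r c : Int)
    (h : 0 ≤ r ∧ r < n ∧ 0 ≤ c ∧ c < m) :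
    visSet (matOf n m V) r c = matOf n m (V ++ [(r, c)]) := by
  apply List.ext_getElem
  · simp [visSet, matOf]
  intro i h1 h2
  simp only [visSet, matOf, List.getElem_modify, List.getElem_map, List.getElem_range] at *
  by_cases hir : r.toNat = i
  · subst hir
    rw [if_pos rfl]
    apply List.ext_getElem
    · simp
    intro j h3 h4
    simp only [List.getElem_set, List.getElem_map, List.getElem_range] at h3 h4 ⊢
    rw [Int.toNat_of_nonneg h.1]
    by_cases hjc : c.toNat = j
    · subst hjc
      rw [if_pos rfl, Int.toNat_of_nonneg h.2.2.1]
      simp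
    · rw [if_neg hjc]
      have hne : ((j : Int)) ≠ c := by omega
      simp [List.mem_append, Prod.ext_iff, hne]
  · rw [if_neg hir]
    have hne : ((i : Int)) ≠ r := by omega
    apply List.ext_getElem
    · simp
    intro j h3 h4
    simp only [List.getElem_map, List.getElem_range] at h3 h4 ⊢
    simp [List.mem_append, Prod.ext_iff, hne]

theorem foldAB (n m : Int) (ds : List (Int × Int)) (rc : Int × Int) (dist : Int) :
    ∀ (V N : List (Int × Int)) (Q : List (Int × Int × Int)),
    ds.foldl (stepA n m dist rc) (matOf n m V, Q ++ enc (dist + 1) N) =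
      (matOf n m (ds.foldl (stepB n m rc) (V, N)).1,
       Q ++ enc (dist + 1) (ds.foldl (stepB n m rc) (V, N)).2) := by
  induction ds with
  | nil => intro V N Q; rfl
  | cons d ds ih =>
    intro V N Q
    simp only [List.foldl_cons]
    by_cases hb : 0 ≤ rc.1 + d.1 ∧ rc.1 + d.1 < n ∧ 0 ≤ rc.2 + d.2 ∧ rc.2 + d.2 < m
    · by_cases hv : (rc.1 + d.1, rc.2 + d.2) ∈ V
      · have hA : stepA n m dist rc (matOf n m V, Q ++ enc (dist + 1) N) d
            = (matOf n m V, Q ++ enc (dist + 1) N) := by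
          simp only [stepA]
          rw [if_pos hb, visGet_matOf n m V _ _ hb]
          simp [hv]
        have hB : stepB n m rc (V, N) d = (V, N) := by
          simp only [stepB]
          rw [if_neg (by simp [hv])]
        rw [hA, hB]
        simpa only [List.foldl_attach] using ih V N Q
      · have hA : stepA n m dist rc (matOf n m V, Q ++ enc (dist + 1) N) d
            = (matOf n m (V ++ [(rc.1 + d.1, rc.2 + d.2)]),
               Q ++ enc (dist + 1) (N ++ [(rc.1 + d.1, rc.2 + d.2)])) := by
          simp only [stepA]
          rw [if_pos hb, visGet_matOf n m V _ _ hb]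
          simp only [hv, decide_eq_false_iff_not, not_false_eq_true, if_pos]
          rw [visSet_matOf n m V _ _ hb]
          simp [enc, List.map_append]
        have hB : stepB n m rc (V, N) d
            = (V ++ [(rc.1 + d.1, rc.2 + d.2)], N ++ [(rc.1 + d.1, rc.2 + d.2)]) := by
          simp only [stepB]
          rw [if_pos ⟨hb.1, hb.2.1, hb.2.2.1, hb.2.2.2, hv⟩, PySem.Set.add_of_not_mem hv]
        rw [hA, hB]
        simpa only [List.foldl_attach] using ih (V ++ [(rc.1 + d.1, rc.2 + d.2)]) (N ++ [(rc.1 + d.1, rc.2 + d.2)]) Q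
    · have hA : stepA n m dist rc (matOf n m V, Q ++ enc (dist + 1) N) d
          = (matOf n m V, Q ++ enc (dist + 1) N) := by
        simp only [stepA]
        rw [if_neg hb]
      have hB : stepB n m rc (V, N) d = (V, N) := by
        simp only [stepB]
        rw [if_neg (by tauto)]
      rw [hA, hB]
      simpa only [List.foldl_attach] using ih V N Q

theorem levelAB (n m er ec : Int) (F : List (Int × Int)) :
    ∀ (V N : List (Int × Int)) (d : Int),
    loopA n m er ec (matOf n m V) (enc d F ++ enc (d + 1) N) =
      (if (er, ec) ∈ F then d
       else loopA n m er ec (matOf n m (F.foldl (cellB n m) (V, N)).1)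
         (enc (d + 1) (F.foldl (cellB n m) (V, N)).2)) := by
  induction F with
  | nil =>
    intro V N d
    rw [if_neg (List.not_mem_nil)]
    rfl
  | cons p F' ih =>
    intro V N d
    have hq : enc d (p :: F') ++ enc (d + 1) N
        = (p.1, p.2, d) :: (enc d F' ++ enc (d + 1) N) := rfl
    rw [hq, loopA]
    by_cases hpe : p.1 = er ∧ p.2 = ec
    · rw [if_pos hpe, if_pos (by
        have : p = (er, ec) := Prod.ext_iff.mpr ⟨hpe.1, hpe.2⟩
        rw [← this]
        exact List.mem_cons_self)]
    · rw [if_neg hpe]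
      have hfold := foldAB n m knightDirs (p.1, p.2) d V N (enc d F')
      rw [hfold]
      have hcell : knightDirs.foldl (stepB n m (p.1, p.2)) (V, N) = cellB n m (V, N) p := rfl
      rw [hcell]
      rw [ih (cellB n m (V, N) p).1 (cellB n m (V, N) p).2 d]
      have hmem : ((er, ec) ∈ p :: F') = ((er, ec) ∈ F') := by
        simp only [List.mem_cons, eq_comm (a := (er, ec))]
        have : ¬ p = (er, ec) := fun hp => hpe ⟨by rw [hp], by rw [hp]⟩
        simp [this]
      rw [List.foldl_cons]
      simp only [hmem]

theorem mainAB (n m er ec : Int) (V F : List (Int × Int)) (d : Int) :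
    loopA n m er ec (matOf n m V) (enc d F) = bLoop n m er ec V F d := by
  induction V, F, d using bLoop.induct n m er ec with
  | case1 V d =>
    rw [bLoop]
    rw [show enc d ([] : List (Int × Int)) = [] from rfl, loopA]
    simp
  | case2 V F d hne hmem =>
    rw [bLoop, if_neg hne, if_pos hmem]
    have hlev := levelAB n m er ec F V [] d
    rw [show enc d F ++ enc (d + 1) ([] : List (Int × Int)) = enc d F from List.append_nil _] at hlev
    rw [hlev, if_pos hmem]
  | case3 V F d hne hmem ih =>
    rw [bLoop, if_neg hne, if_neg hmem]
    have hlev := levelAB n m er ec F V [] d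
    rw [show enc d F ++ enc (d + 1) ([] : List (Int × Int)) = enc d F from List.append_nil _] at hlev
    rw [hlev, if_neg hmem]
    simpa only [List.foldl_attach] using ih

theorem pyGetD_zero_headD (board : List (List Int)) :
    PySem.List.pyGetD board 0 [] = board.headD [] := by
  cases board <;> simp [PySem.List.pyGetD_zero, List.getD]

-- ---- knight-move graph theory ----
def inbP (n m : Int) (p : Int × Int) : Prop :=
  0 ≤ p.1 ∧ p.1 < n ∧ 0 ≤ p.2 ∧ p.2 < m

def adjK (n m : Int) (q p : Int × Int) : Prop :=
  inbP n m q ∧ inbP n m p ∧ (p.1 - q.1, p.2 - q.2) ∈ knightDirs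

def reach (n m : Int) (s : Int × Int) : Nat → (Int × Int) → Prop
  | 0, p => p = s
  | (k+1), p => reach n m s k p ∨ ∃ q, reach n m s k q ∧ adjK n m q p

def exactAt (n m : Int) (s : Int × Int) (k : Nat) (p : Int × Int) : Prop :=
  reach n m s k p ∧ ∀ t < k, ¬ reach n m s t p

theorem reach_mono (n m : Int) (s p : Int × Int) {k k' : Nat}
    (h : reach n m s k p) (hk : k ≤ k') : reach n m s k' p := by
  induction k' with
  | zero =>
    have : k = 0 := Nat.le_zero.mp hk
    subst this; exact h
  | succ k' ih =>
    rcases Nat.lt_or_ge k (k'+1) with hlt | hge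
    · exact Or.inl (ih (Nat.lt_succ_iff.mp hlt))
    · have : k = k' + 1 := Nat.le_antisymm hk hge
      subst this; exact h

theorem reach_inb (n m : Int) (s p : Int × Int) {k : Nat}
    (h : reach n m s k p) : p = s ∨ inbP n m p := by
  induction k with
  | zero => exact Or.inl h
  | succ k ih =>
    rcases h with h | ⟨q, _, hadj⟩
    · exact ih h
    · exact Or.inr hadj.2.1

theorem mem_knightDirs (a b : Int) : (a, b) ∈ knightDirs ↔
    (a = -2 ∧ b = -1) ∨ (a = -2 ∧ b = 1) ∨ (a = -1 ∧ b = -2) ∨ (a = -1 ∧ b = 2) ∨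
    (a = 1 ∧ b = -2) ∨ (a = 1 ∧ b = 2) ∨ (a = 2 ∧ b = -1) ∨ (a = 2 ∧ b = 1) := by
  simp only [knightDirs, List.mem_cons, List.not_mem_nil, or_false, Prod.mk.injEq]

theorem adjK_symm (n m : Int) (q p : Int × Int) (h : adjK n m q p) : adjK n m p q := by
  obtain ⟨h1, h2, h3⟩ := h
  refine ⟨h2, h1, ?_⟩
  rw [mem_knightDirs] at h3 ⊢
  rcases h3 with ⟨ha,hb⟩|⟨ha,hb⟩|⟨ha,hb⟩|⟨ha,hb⟩|⟨ha,hb⟩|⟨ha,hb⟩|⟨ha,hb⟩|⟨ha,hb⟩ <;> omega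

theorem reach_prepend (n m : Int) (u q p : Int × Int) (k : Nat)
    (ha : adjK n m u q) (h : reach n m q k p) : reach n m u (k+1) p := by
  induction k generalizing p with
  | zero => subst h; exact Or.inr ⟨u, rfl, ha⟩
  | succ k ih =>
    rcases h with h | ⟨r, hr, hadj⟩
    · exact Or.inl (ih p h)
    · exact Or.inr ⟨r, ih r hr, hadj⟩

theorem reach_rev (n m : Int) (u p : Int × Int) (k : Nat)
    (h : reach n m u k p) : reach n m p k u := by
  induction k generalizing p with
  | zero => subst h; rfl
  | succ k ih =>
    rcases h with h | ⟨q, hq, hadj⟩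
    · exact reach_mono n m p u (ih p h) (Nat.le_succ k)
    · exact reach_prepend n m p q u k (adjK_symm n m q p hadj) (ih q hq)

theorem reach_trans (n m : Int) (u p v : Int × Int) (a b : Nat)
    (h1 : reach n m u a p) (h2 : reach n m p b v) : reach n m u (a+b) v := by
  induction b generalizing v with
  | zero => subst h2; simpa using h1
  | succ b ih =>
    rcases h2 with h2 | ⟨q, hq, hadj⟩
    · exact reach_mono n m u v (ih v h2) (by omega)
    · exact Or.inr ⟨q, ih q hq, hadj⟩

theorem reach_split (n m : Int) (u v : Int × Int) (a b : Nat)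
    (h : reach n m u (a+b) v) : ∃ p, reach n m u a p ∧ reach n m p b v := by
  induction b generalizing v with
  | zero => exact ⟨v, by simpa using h, rfl⟩
  | succ b ih =>
    have hsum : a + (b + 1) = (a + b) + 1 := by omega
    rw [hsum] at h
    rcases h with h | ⟨q, hq, hadj⟩
    · obtain ⟨p, hp1, hp2⟩ := ih v h
      exact ⟨p, hp1, reach_mono n m p v hp2 (Nat.le_succ b)⟩
    · obtain ⟨p, hp1, hp2⟩ := ih q hq
      exact ⟨p, hp1, Or.inr ⟨q, hp2, hadj⟩⟩

theorem reach_stable (n m : Int) (u : Int × Int) (a : Nat)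
    (h : ∀ p, reach n m u (a+1) p → reach n m u a p) :
    ∀ (k : Nat) (p : Int × Int), reach n m u k p → reach n m u a p := by
  intro k
  induction k with
  | zero =>
    intro p hp
    exact reach_mono n m u p hp (Nat.zero_le a)
  | succ k ih =>
    intro p hp
    rcases hp with hp | ⟨q, hq, hadj⟩
    · exact ih p hp
    · exact h p (Or.inr ⟨q, ih q hq, hadj⟩)

theorem reach_succ_exact (n m : Int) (u p : Int × Int) (i : Nat)
    (hr : reach n m u (i+1) p) (hni : ¬ reach n m u i p) :
    ∃ q, exactAt n m u i q ∧ adjK n m q p := by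
  rcases hr with hr | ⟨q, hq, hadj⟩
  · exact absurd hr hni
  · refine ⟨q, ⟨hq, ?_⟩, hadj⟩
    intro t ht hqt
    exact hni (reach_mono n m u p (show reach n m u (t+1) p from Or.inr ⟨q, hqt, hadj⟩) (by omega))

-- ---- membership characterisations of the fold/expansion helpers ----
theorem stepB_fold (n m : Int) (rc : Int × Int) :
    ∀ (ds : List (Int × Int)) (V N : List (Int × Int)), (∀ p ∈ N, p ∈ V) →
    ((∀ p, p ∈ (ds.foldl (stepB n m rc) (V, N)).1 ↔ p ∈ V ∨ p ∈ (ds.foldl (stepB n m rc) (V, N)).2) ∧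
     (∀ p : Int × Int, p ∈ (ds.foldl (stepB n m rc) (V, N)).2 ↔
        p ∈ N ∨ (p ∉ V ∧ inbP n m p ∧ ∃ d ∈ ds, p = (rc.1 + d.1, rc.2 + d.2)))) := by
  intro ds
  induction ds with
  | nil =>
    intro V N hN
    simp only [List.foldl_nil]
    constructor
    · intro p
      constructor
      · exact Or.inl
      · rintro (h | h)
        · exact h
        · exact hN p h
    · intro p
      constructor
      · exact Or.inl
      · rintro (h | ⟨_, _, d, hd, _⟩)
        · exact h
        · cases hd
  | cons d ds ih =>
    intro V N hN
    simp only [List.foldl_cons]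
    by_cases hg : 0 ≤ rc.1 + d.1 ∧ rc.1 + d.1 < n ∧ 0 ≤ rc.2 + d.2 ∧ rc.2 + d.2 < m ∧
        (rc.1 + d.1, rc.2 + d.2) ∉ V
    · have hstep : stepB n m rc (V, N) d
          = (V ++ [(rc.1 + d.1, rc.2 + d.2)], N ++ [(rc.1 + d.1, rc.2 + d.2)]) := by
        simp only [stepB]
        rw [if_pos hg, PySem.Set.add_of_not_mem hg.2.2.2.2]
      rw [hstep]
      have hN' : ∀ p ∈ N ++ [(rc.1 + d.1, rc.2 + d.2)], p ∈ V ++ [(rc.1 + d.1, rc.2 + d.2)] := by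
        intro p hp
        rcases List.mem_append.mp hp with h | h
        · exact List.mem_append.mpr (Or.inl (hN p h))
        · exact List.mem_append.mpr (Or.inr h)
      obtain ⟨ih1, ih2⟩ := ih _ _ hN'
      have hp0G : (rc.1 + d.1, rc.2 + d.2) ∈
          (ds.foldl (stepB n m rc) (V ++ [(rc.1 + d.1, rc.2 + d.2)], N ++ [(rc.1 + d.1, rc.2 + d.2)])).2 :=
        (ih2 _).mpr (Or.inl (List.mem_append.mpr (Or.inr (List.mem_singleton.mpr rfl))))
      constructor
      · intro p
        rw [ih1 p]
        constructor
        · rintro (h | h)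
          · rcases List.mem_append.mp h with h | h
            · exact Or.inl h
            · exact Or.inr ((List.mem_singleton.mp h) ▸ hp0G)
          · exact Or.inr h
        · rintro (h | h)
          · exact Or.inl (List.mem_append.mpr (Or.inl h))
          · exact Or.inr h
      · intro p
        rw [ih2 p]
        by_cases hpp : p = (rc.1 + d.1, rc.2 + d.2)
        · subst hpp
          constructor
          · intro _
            exact Or.inr ⟨hg.2.2.2.2, ⟨hg.1, hg.2.1, hg.2.2.1, hg.2.2.2.1⟩,
              ⟨d, List.mem_cons_self, rfl⟩⟩
          · intro _
            exact Or.inl (List.mem_append.mpr (Or.inr (List.mem_singleton.mpr rfl)))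
        · constructor
          · rintro (h | ⟨hnv, hinb, d', hd', hpd'⟩)
            · rcases List.mem_append.mp h with h | h
              · exact Or.inl h
              · exact absurd (List.mem_singleton.mp h) hpp
            · exact Or.inr ⟨fun hv => hnv (List.mem_append.mpr (Or.inl hv)), hinb,
                d', List.mem_cons_of_mem _ hd', hpd'⟩
          · rintro (h | ⟨hnv, hinb, d', hd', hpd'⟩)
            · exact Or.inl (List.mem_append.mpr (Or.inl h))
            · rcases List.mem_cons.mp hd' with rfl | hd''
              · exact absurd hpd' hpp
              · refine Or.inr ⟨fun hv => ?_, hinb, d', hd'', hpd'⟩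
                rcases List.mem_append.mp hv with hv | hv
                · exact hnv hv
                · exact hpp (List.mem_singleton.mp hv)
    · have hstep : stepB n m rc (V, N) d = (V, N) := by
        simp only [stepB]
        rw [if_neg hg]
      rw [hstep]
      obtain ⟨ih1, ih2⟩ := ih V N hN
      refine ⟨ih1, fun p => ?_⟩
      rw [ih2 p]
      constructor
      · rintro (h | ⟨hnv, hinb, d', hd', hpd'⟩)
        · exact Or.inl h
        · exact Or.inr ⟨hnv, hinb, d', List.mem_cons_of_mem _ hd', hpd'⟩
      · rintro (h | ⟨hnv, hinb, d', hd', hpd'⟩)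
        · exact Or.inl h
        · rcases List.mem_cons.mp hd' with rfl | hd''
          · subst hpd'
            exact absurd ⟨hinb.1, hinb.2.1, hinb.2.2.1, hinb.2.2.2, hnv⟩ hg
          · exact Or.inr ⟨hnv, hinb, d', hd'', hpd'⟩

theorem cellB_fold (n m : Int) :
    ∀ (F : List (Int × Int)) (V N : List (Int × Int)), (∀ p ∈ N, p ∈ V) →
    ((∀ p, p ∈ (F.foldl (cellB n m) (V, N)).1 ↔ p ∈ V ∨ p ∈ (F.foldl (cellB n m) (V, N)).2) ∧
     (∀ p : Int × Int, p ∈ (F.foldl (cellB n m) (V, N)).2 ↔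
        p ∈ N ∨ (p ∉ V ∧ inbP n m p ∧ ∃ q ∈ F, ∃ d ∈ knightDirs, p = (q.1 + d.1, q.2 + d.2)))) := by
  intro F
  induction F with
  | nil =>
    intro V N hN
    simp only [List.foldl_nil]
    constructor
    · intro p
      constructor
      · exact Or.inl
      · rintro (h | h)
        · exact h
        · exact hN p h
    · intro p
      constructor
      · exact Or.inl
      · rintro (h | ⟨_, _, q, hq, _⟩)
        · exact h
        · cases hq
  | cons rc F ih =>
    intro V N hN
    simp only [List.foldl_cons]
    obtain ⟨s1, s2⟩ := stepB_fold n m rc knightDirs V N hN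
    have hcell : cellB n m (V, N) rc = knightDirs.foldl (stepB n m rc) (V, N) := rfl
    rw [hcell]
    have hN1 : ∀ p ∈ (knightDirs.foldl (stepB n m rc) (V, N)).2,
        p ∈ (knightDirs.foldl (stepB n m rc) (V, N)).1 := by
      intro p hp
      exact (s1 p).mpr (Or.inr hp)
    obtain ⟨i1, i2⟩ := ih _ _ hN1
    constructor
    · intro p
      rw [i1 p, s1 p]
      constructor
      · rintro ((h | h) | h)
        · exact Or.inl h
        · exact Or.inr ((i2 p).mpr (Or.inl h))
        · exact Or.inr h
      · rintro (h | h)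
        · exact Or.inl (Or.inl h)
        · exact Or.inr h
    · intro p
      rw [i2 p]
      constructor
      · rintro (h | ⟨hnv1, hinb, q, hq, hgen⟩)
        · rcases (s2 p).mp h with h | ⟨hnv, hinb, d, hd, hpd⟩
          · exact Or.inl h
          · exact Or.inr ⟨hnv, hinb, rc, List.mem_cons_self, d, hd, hpd⟩
        · have hnv : p ∉ V := fun hv => hnv1 ((s1 p).mpr (Or.inl hv))
          exact Or.inr ⟨hnv, hinb, q, List.mem_cons_of_mem _ hq, hgen⟩
      · rintro (h | ⟨hnv, hinb, q, hq, d, hd, hpd⟩)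
        · exact Or.inl ((s2 p).mpr (Or.inl h))
        · rcases List.mem_cons.mp hq with rfl | hq'
          · exact Or.inl ((s2 p).mpr (Or.inr ⟨hnv, hinb, d, hd, hpd⟩))
          · by_cases hp1 : p ∈ (knightDirs.foldl (stepB n m rc) (V, N)).1
            · rcases (s1 p).mp hp1 with hv | hn
              · exact absurd hv hnv
              · exact Or.inl hn
            · exact Or.inr ⟨hp1, hinb, q, hq', d, hd, hpd⟩

theorem tryMoves_some (n m : Int) (E : List (Int × Int)) (rc : Int × Int) :
    ∀ (ds : List (Int × Int)) (S acc S' A' : List (Int × Int)), (∀ p ∈ acc, p ∈ S) →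
    tryMoves n m S E acc rc ds = some (S', A') →
    ((∀ p, p ∈ S' ↔ p ∈ S ∨ p ∈ A') ∧
     (∀ p : Int × Int, p ∈ A' ↔ p ∈ acc ∨ (p ∉ S ∧ inbP n m p ∧ ∃ d ∈ ds, p = (rc.1 + d.1, rc.2 + d.2))) ∧
     (∀ p, p ∈ A' → p ∉ acc → p ∉ E)) := by
  intro ds
  induction ds with
  | nil =>
    intro S acc S' A' hacc heq
    simp only [tryMoves] at heq
    cases heq
    refine ⟨?_, ?_, ?_⟩
    · intro p
      constructor
      · exact Or.inl
      · rintro (h | h)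
        · exact h
        · exact hacc p h
    · intro p
      constructor
      · exact Or.inl
      · rintro (h | ⟨_, _, d, hd, _⟩)
        · exact h
        · cases hd
    · intro p hp hnp
      exact absurd hp hnp
  | cons d ds ih =>
    intro S acc S' A' hacc heq
    simp only [tryMoves] at heq
    split_ifs at heq with hg hE
    · rw [PySem.Set.add_of_not_mem hg.2.2.2.2] at heq
      have hacc' : ∀ p ∈ acc ++ [(rc.1 + d.1, rc.2 + d.2)], p ∈ S ++ [(rc.1 + d.1, rc.2 + d.2)] := by
        intro p hp
        rcases List.mem_append.mp hp with h | h
        · exact List.mem_append.mpr (Or.inl (hacc p h))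
        · exact List.mem_append.mpr (Or.inr h)
      obtain ⟨j1, j2, j3⟩ := ih _ _ _ _ hacc' heq
      have hp0A : (rc.1 + d.1, rc.2 + d.2) ∈ A' :=
        (j2 _).mpr (Or.inl (List.mem_append.mpr (Or.inr (List.mem_singleton.mpr rfl))))
      refine ⟨?_, ?_, ?_⟩
      · intro p
        rw [j1 p]
        constructor
        · rintro (h | h)
          · rcases List.mem_append.mp h with h | h
            · exact Or.inl h
            · exact Or.inr ((List.mem_singleton.mp h) ▸ hp0A)
          · exact Or.inr h
        · rintro (h | h)
          · exact Or.inl (List.mem_append.mpr (Or.inl h))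
          · exact Or.inr h
      · intro p
        rw [j2 p]
        by_cases hpp : p = (rc.1 + d.1, rc.2 + d.2)
        · subst hpp
          constructor
          · intro _
            exact Or.inr ⟨hg.2.2.2.2, ⟨hg.1, hg.2.1, hg.2.2.1, hg.2.2.2.1⟩,
              ⟨d, List.mem_cons_self, rfl⟩⟩
          · intro _
            exact Or.inl (List.mem_append.mpr (Or.inr (List.mem_singleton.mpr rfl)))
        · constructor
          · rintro (h | ⟨hnv, hinb, d', hd', hpd'⟩)
            · rcases List.mem_append.mp h with h | h
              · exact Or.inl h
              · exact absurd (List.mem_singleton.mp h) hpp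
            · exact Or.inr ⟨fun hv => hnv (List.mem_append.mpr (Or.inl hv)), hinb,
                d', List.mem_cons_of_mem _ hd', hpd'⟩
          · rintro (h | ⟨hnv, hinb, d', hd', hpd'⟩)
            · exact Or.inl (List.mem_append.mpr (Or.inl h))
            · rcases List.mem_cons.mp hd' with rfl | hd''
              · exact absurd hpd' hpp
              · refine Or.inr ⟨fun hv => ?_, hinb, d', hd'', hpd'⟩
                rcases List.mem_append.mp hv with hv | hv
                · exact hnv hv
                · exact hpp (List.mem_singleton.mp hv)
      · intro p hpA hpacc
        by_cases hpp : p = (rc.1 + d.1, rc.2 + d.2)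
        · subst hpp
          exact hE
        · refine j3 p hpA ?_
          intro hv
          rcases List.mem_append.mp hv with hv | hv
          · exact hpacc hv
          · exact hpp (List.mem_singleton.mp hv)
    · obtain ⟨j1, j2, j3⟩ := ih _ _ _ _ hacc heq
      refine ⟨j1, ?_, j3⟩
      intro p
      rw [j2 p]
      constructor
      · rintro (h | ⟨hnv, hinb, d', hd', hpd'⟩)
        · exact Or.inl h
        · exact Or.inr ⟨hnv, hinb, d', List.mem_cons_of_mem _ hd', hpd'⟩
      · rintro (h | ⟨hnv, hinb, d', hd', hpd'⟩)
        · exact Or.inl h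
        · rcases List.mem_cons.mp hd' with rfl | hd''
          · subst hpd'
            exact absurd ⟨hinb.1, hinb.2.1, hinb.2.2.1, hinb.2.2.2, hnv⟩ hg
          · exact Or.inr ⟨hnv, hinb, d', hd'', hpd'⟩

theorem tryMoves_none (n m : Int) (E : List (Int × Int)) (rc : Int × Int) :
    ∀ (ds : List (Int × Int)) (S acc : List (Int × Int)),
    tryMoves n m S E acc rc ds = none →
    ∃ p : Int × Int, p ∉ S ∧ inbP n m p ∧ (∃ d ∈ ds, p = (rc.1 + d.1, rc.2 + d.2)) ∧ p ∈ E := by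
  intro ds
  induction ds with
  | nil =>
    intro S acc heq
    simp only [tryMoves] at heq
    cases heq
  | cons d ds ih =>
    intro S acc heq
    simp only [tryMoves] at heq
    split_ifs at heq with hg hE
    · exact ⟨(rc.1 + d.1, rc.2 + d.2), hg.2.2.2.2, ⟨hg.1, hg.2.1, hg.2.2.1, hg.2.2.2.1⟩,
        ⟨d, List.mem_cons_self, rfl⟩, hE⟩
    · rw [PySem.Set.add_of_not_mem hg.2.2.2.2] at heq
      obtain ⟨p, hpS, hinb, ⟨d', hd', hpd'⟩, hpE⟩ := ih _ _ heq
      exact ⟨p, fun hv => hpS (List.mem_append.mpr (Or.inl hv)), hinb,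
        ⟨d', List.mem_cons_of_mem _ hd', hpd'⟩, hpE⟩
    · obtain ⟨p, hpS, hinb, ⟨d', hd', hpd'⟩, hpE⟩ := ih _ _ heq
      exact ⟨p, hpS, hinb, ⟨d', List.mem_cons_of_mem _ hd', hpd'⟩, hpE⟩

theorem tryMoves_subset (n m : Int) (E : List (Int × Int)) (rc : Int × Int) :
    ∀ (ds : List (Int × Int)) (S acc S' A' : List (Int × Int)),
    tryMoves n m S E acc rc ds = some (S', A') → ∀ p ∈ S, p ∈ S' := by
  intro ds
  induction ds with
  | nil =>
    intro S acc S' A' heq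
    simp only [tryMoves] at heq
    cases heq
    exact fun p hp => hp
  | cons d ds ih =>
    intro S acc S' A' heq
    simp only [tryMoves] at heq
    split_ifs at heq with hg hE
    · rw [PySem.Set.add_of_not_mem hg.2.2.2.2] at heq
      intro p hp
      exact ih _ _ _ _ heq p (List.mem_append.mpr (Or.inl hp))
    · exact ih _ _ _ _ heq

theorem expandFront_some (n m : Int) (E : List (Int × Int)) :
    ∀ (F : List (Int × Int)) (S acc S' F' : List (Int × Int)), (∀ p ∈ acc, p ∈ S) →
    expandFront n m S E acc F = some (S', F') →
    ((∀ p, p ∈ S' ↔ p ∈ S ∨ p ∈ F') ∧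
     (∀ p : Int × Int, p ∈ F' ↔ p ∈ acc ∨ (p ∉ S ∧ inbP n m p ∧ ∃ q ∈ F, ∃ d ∈ knightDirs, p = (q.1 + d.1, q.2 + d.2))) ∧
     (∀ p, p ∈ F' → p ∉ acc → p ∉ E)) := by
  intro F
  induction F with
  | nil =>
    intro S acc S' F' hacc heq
    simp only [expandFront] at heq
    cases heq
    refine ⟨?_, ?_, ?_⟩
    · intro p
      constructor
      · exact Or.inl
      · rintro (h | h)
        · exact h
        · exact hacc p h
    · intro p
      constructor
      · exact Or.inl
      · rintro (h | ⟨_, _, q, hq, _⟩)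
        · exact h
        · cases hq
    · intro p hp hnp
      exact absurd hp hnp
  | cons rc rest ih =>
    intro S acc S' F' hacc heq
    simp only [expandFront] at heq
    rcases hm : tryMoves n m S E acc rc knightMoves with _ | ⟨S1, A1⟩
    · rw [hm] at heq
      cases heq
    · rw [hm] at heq
      have hm' : tryMoves n m S E acc rc knightDirs = some (S1, A1) := hm
      obtain ⟨t1, t2, t3⟩ := tryMoves_some n m E rc knightDirs S acc S1 A1 hacc hm'
      have hacc1 : ∀ p ∈ A1, p ∈ S1 := fun p hp => (t1 p).mpr (Or.inr hp)
      obtain ⟨e1, e2, e3⟩ := ih _ _ _ _ hacc1 heq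
      refine ⟨?_, ?_, ?_⟩
      · intro p
        rw [e1 p, t1 p]
        constructor
        · rintro ((h | h) | h)
          · exact Or.inl h
          · exact Or.inr ((e2 p).mpr (Or.inl h))
          · exact Or.inr h
        · rintro (h | h)
          · exact Or.inl (Or.inl h)
          · exact Or.inr h
      · intro p
        rw [e2 p]
        constructor
        · rintro (h | ⟨hnv1, hinb, q, hq, hgen⟩)
          · rcases (t2 p).mp h with h | ⟨hnv, hinb, d, hd, hpd⟩
            · exact Or.inl h
            · exact Or.inr ⟨hnv, hinb, rc, List.mem_cons_self, d, hd, hpd⟩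
          · have hnv : p ∉ S := fun hv => hnv1 ((t1 p).mpr (Or.inl hv))
            exact Or.inr ⟨hnv, hinb, q, List.mem_cons_of_mem _ hq, hgen⟩
        · rintro (h | ⟨hnv, hinb, q, hq, d, hd, hpd⟩)
          · exact Or.inl ((t2 p).mpr (Or.inl h))
          · rcases List.mem_cons.mp hq with rfl | hq'
            · exact Or.inl ((t2 p).mpr (Or.inr ⟨hnv, hinb, d, hd, hpd⟩))
            · by_cases hp1 : p ∈ S1
              · rcases (t1 p).mp hp1 with hv | hn
                · exact absurd hv hnv
                · exact Or.inl hn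
              · exact Or.inr ⟨hp1, hinb, q, hq', d, hd, hpd⟩
      · intro p hpF hpacc
        by_cases hpA : p ∈ A1
        · exact t3 p hpA hpacc
        · exact e3 p hpF hpA

theorem expandFront_none (n m : Int) (E : List (Int × Int)) :
    ∀ (F : List (Int × Int)) (S acc : List (Int × Int)),
    expandFront n m S E acc F = none →
    ∃ p : Int × Int, p ∉ S ∧ inbP n m p ∧ (∃ q ∈ F, ∃ d ∈ knightDirs, p = (q.1 + d.1, q.2 + d.2)) ∧ p ∈ E := by
  intro F
  induction F with
  | nil =>
    intro S acc heq
    simp only [expandFront] at heq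
    cases heq
  | cons rc rest ih =>
    intro S acc heq
    simp only [expandFront] at heq
    rcases hm : tryMoves n m S E acc rc knightMoves with _ | ⟨S1, A1⟩
    · have hm' : tryMoves n m S E acc rc knightDirs = none := hm
      obtain ⟨p, hpS, hinb, ⟨d, hd, hpd⟩, hpE⟩ := tryMoves_none n m E rc knightDirs S acc hm'
      exact ⟨p, hpS, hinb, ⟨rc, List.mem_cons_self, d, hd, hpd⟩, hpE⟩
    · rw [hm] at heq
      obtain ⟨p, hpS, hinb, hgen, hpE⟩ := ih _ _ heq
      have hsub : ∀ x ∈ S, x ∈ S1 := tryMoves_subset n m E rc knightMoves S acc S1 A1 hm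
      obtain ⟨q, hq, d, hd, hpd⟩ := hgen
      exact ⟨p, fun hv => hpS (hsub p hv), hinb, ⟨q, List.mem_cons_of_mem _ hq, d, hd, hpd⟩, hpE⟩

theorem adjK_of_move (n m : Int) (q p d : Int × Int) (hq : inbP n m q) (hp : inbP n m p)
    (hd : d ∈ knightDirs) (hpd : p = (q.1 + d.1, q.2 + d.2)) : adjK n m q p := by
  obtain ⟨d1, d2⟩ := d
  refine ⟨hq, hp, ?_⟩
  subst hpd
  rw [mem_knightDirs] at hd ⊢
  rcases hd with ⟨ha,hb⟩|⟨ha,hb⟩|⟨ha,hb⟩|⟨ha,hb⟩|⟨ha,hb⟩|⟨ha,hb⟩|⟨ha,hb⟩|⟨ha,hb⟩ <;> omega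

theorem move_of_adjK (n m : Int) (q p : Int × Int) (h : adjK n m q p) :
    ∃ d ∈ knightDirs, p = (q.1 + d.1, q.2 + d.2) := by
  refine ⟨(p.1 - q.1, p.2 - q.2), h.2.2, ?_⟩
  simp

-- one BFS level step preserves the ball/frontier characterisation
theorem step_reach (n m : Int) (u : Int × Int) (hu : inbP n m u) (i : Nat)
    (S F S' F' : List (Int × Int))
    (hS : ∀ p, p ∈ S ↔ reach n m u i p)
    (hF : ∀ p, p ∈ F ↔ exactAt n m u i p)
    (h1 : ∀ p, p ∈ S' ↔ p ∈ S ∨ p ∈ F')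
    (h2 : ∀ p : Int × Int, p ∈ F' ↔
        (p ∉ S ∧ inbP n m p ∧ ∃ q ∈ F, ∃ d ∈ knightDirs, p = (q.1 + d.1, q.2 + d.2))) :
    (∀ p, p ∈ S' ↔ reach n m u (i+1) p) ∧ (∀ p, p ∈ F' ↔ exactAt n m u (i+1) p) := by
  have hreach : ∀ p, p ∈ F' → reach n m u (i+1) p := by
    intro p hp
    obtain ⟨hnS, hinb, q, hq, d, hd, hpd⟩ := (h2 p).mp hp
    have hqx := (hF q).mp hq
    have hinbq : inbP n m q := by
      rcases reach_inb n m u q hqx.1 with h | h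
      · rw [h]; exact hu
      · exact h
    exact Or.inr ⟨q, hqx.1, adjK_of_move n m q p d hinbq hinb hd hpd⟩
  have hF' : ∀ p, p ∈ F' ↔ exactAt n m u (i+1) p := by
    intro p
    constructor
    · intro hp
      obtain ⟨hnS, hinb, q, hq, d, hd, hpd⟩ := (h2 p).mp hp
      refine ⟨hreach p hp, ?_⟩
      intro t ht hrt
      exact hnS ((hS p).mpr (reach_mono n m u p hrt (by omega)))
    · rintro ⟨hr, hmin⟩
      have hni : ¬ reach n m u i p := hmin i (Nat.lt_succ_self i)
      obtain ⟨q, hqe, hadj⟩ := reach_succ_exact n m u p i hr hni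
      have hnS : p ∉ S := fun hv => hni ((hS p).mp hv)
      have hinbp : inbP n m p := by
        rcases reach_inb n m u p hr with h | h
        · exact absurd (reach_mono n m u p (show reach n m u 0 p from h) (Nat.zero_le i)) hni
        · exact h
      obtain ⟨d, hd, hpd⟩ := move_of_adjK n m q p hadj
      exact (h2 p).mpr ⟨hnS, hinbp, q, (hF q).mpr hqe, d, hd, hpd⟩
  refine ⟨?_, hF'⟩
  intro p
  rw [h1 p]
  constructor
  · rintro (h | h)
    · exact reach_mono n m u p ((hS p).mp h) (Nat.le_succ i)
    · exact hreach p h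
  · intro hr
    by_cases hri : reach n m u i p
    · exact Or.inl ((hS p).mpr hri)
    · refine Or.inr ((hF' p).mpr ⟨hr, ?_⟩)
      intro t ht hrt
      exact hri (reach_mono n m u p hrt (by omega))

-- ---- both loops compute the least knight distance ----
def BFSResult (n m : Int) (s e : Int × Int) (r : Int) : Prop :=
  (∃ D : Nat, reach n m s D e ∧ (∀ t < D, ¬ reach n m s t e) ∧ r = (D : Int)) ∨
  ((∀ D : Nat, ¬ reach n m s D e) ∧ r = -1)

theorem bfsResult_unique (n m : Int) (s e : Int × Int) (r1 r2 : Int)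
    (h1 : BFSResult n m s e r1) (h2 : BFSResult n m s e r2) : r1 = r2 := by
  rcases h1 with ⟨D1, r1, m1, e1⟩ | ⟨u1, e1⟩
  · rcases h2 with ⟨D2, r2, m2, e2⟩ | ⟨u2, e2⟩
    · have : D1 = D2 := by
        rcases Nat.lt_trichotomy D1 D2 with h | h | h
        · exact absurd r1 (m2 D1 h)
        · exact h
        · exact absurd r2 (m1 D2 h)
      rw [e1, e2, this]
    · exact absurd r1 (u2 D1)
  · rcases h2 with ⟨D2, r2, m2, e2⟩ | ⟨u2, e2⟩
    · exact absurd r2 (u1 D2)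
    · rw [e1, e2]

theorem bfsResult_symm (n m : Int) (u v : Int × Int) (r : Int)
    (h : BFSResult n m v u r) : BFSResult n m u v r := by
  rcases h with ⟨D, hr, hmin, he⟩ | ⟨hu, he⟩
  · refine Or.inl ⟨D, reach_rev n m v u D hr, ?_, he⟩
    intro t ht hrt
    exact hmin t ht (reach_rev n m u v t hrt)
  · refine Or.inr ⟨?_, he⟩
    intro D hD
    exact hu D (reach_rev n m u v D hD)

theorem bLoop_correct (n m er ec : Int) (s : Int × Int) (hs : inbP n m s) :
    ∀ (V F : List (Int × Int)) (d : Int) (k : Nat), d = (k : Int) →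
    (∀ p, p ∈ V ↔ reach n m s k p) →
    (∀ p, p ∈ F ↔ exactAt n m s k p) →
    (∀ t < k, ¬ reach n m s t (er, ec)) →
    BFSResult n m s (er, ec) (bLoop n m er ec V F d) := by
  intro V F d
  induction V, F, d using bLoop.induct n m er ec with
  | case1 V d =>
    intro k hd hV hF hNot
    have hval : bLoop n m er ec V [] d = -1 := by
      rw [bLoop]
      simp
    rw [hval]
    refine Or.inr ⟨?_, rfl⟩
    cases k with
    | zero =>
      exfalso
      have : s ∈ ([] : List (Int × Int)) := (hF s).mpr
        ⟨show reach n m s 0 s from rfl, fun t ht => absurd ht (Nat.not_lt_zero t)⟩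
      cases this
    | succ k' =>
      have hstab : ∀ p, reach n m s (k'+1) p → reach n m s k' p := by
        intro p hp
        by_contra hnp
        have hex : exactAt n m s (k'+1) p :=
          ⟨hp, fun t ht hrt => hnp (reach_mono n m s p hrt (by omega))⟩
        exact absurd ((hF p).mpr hex) List.not_mem_nil
      intro D hD
      exact hNot k' (Nat.lt_succ_self k') (reach_stable n m s k' hstab D _ hD)
  | case2 V F d hne hmem =>
    intro k hd hV hF hNot
    have hval : bLoop n m er ec V F d = d := by
      rw [bLoop]
      simp [hne, hmem]
    rw [hval]
    obtain ⟨hr, hmin⟩ := (hF _).mp hmem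
    exact Or.inl ⟨k, hr, hmin, hd⟩
  | case3 V F d hne hmem ih =>
    intro k hd hV hF hNot
    have hval : bLoop n m er ec V F d
        = bLoop n m er ec (F.foldl (cellB n m) (V, [])).1 (F.foldl (cellB n m) (V, [])).2 (d+1) := by
      rw [bLoop]
      simp [hne, hmem]
    rw [hval]
    obtain ⟨c1, c2⟩ := cellB_fold n m F V [] (by intro p hp; cases hp)
    have h2' : ∀ p : Int × Int, p ∈ (F.foldl (cellB n m) (V, [])).2 ↔
        (p ∉ V ∧ inbP n m p ∧ ∃ q ∈ F, ∃ d' ∈ knightDirs, p = (q.1 + d'.1, q.2 + d'.2)) := by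
      intro p
      rw [c2 p]
      simp only [List.not_mem_nil, false_or]
    obtain ⟨hS', hF'⟩ := step_reach n m s hs k V F _ _ hV hF c1 h2'
    have hnot' : ∀ t < k + 1, ¬ reach n m s t (er, ec) := by
      intro t ht hrt
      rcases Nat.lt_succ_iff_lt_or_eq.mp ht with ht' | rfl
      · exact hNot t ht' hrt
      · exact hmem ((hF _).mpr ⟨hrt, hNot⟩)
    have hd' : d + 1 = ((k + 1 : Nat) : Int) := by
      rw [hd]; push_cast; ring
    rw [List.foldl_attach] at ih
    exact ih (k+1) hd' hS' hF' hnot'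

theorem biLoop_correct (n m : Int) :
    ∀ (Ss Fs Se Fe : List (Int × Int)) (ds de : Int),
    ∀ (u v : Int × Int) (i j : Nat), inbP n m u → inbP n m v →
    ds = (i : Int) → de = (j : Int) →
    (∀ p, p ∈ Ss ↔ reach n m u i p) → (∀ p, p ∈ Fs ↔ exactAt n m u i p) →
    (∀ p, p ∈ Se ↔ reach n m v j p) → (∀ p, p ∈ Fe ↔ exactAt n m v j p) →
    (∀ p, ¬ (reach n m u i p ∧ reach n m v j p)) →
    BFSResult n m u v (biLoop n m Ss Fs Se Fe ds de) := by
  intro Ss Fs Se Fe ds de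
  induction Ss, Fs, Se, Fe, ds, de using biLoop.induct n m with
  | case1 Ss Fs Se Fe ds de hc =>
    intro u v i j hu hv hds hde hSs hFs hSe hFe hNoMeet
    have hval : biLoop n m Ss Fs Se Fe ds de = -1 := by
      rw [biLoop]
      simp [hc]
    rw [hval]
    refine Or.inr ⟨?_, rfl⟩
    intro D hD
    rcases hc with hc | hc
    · subst hc
      cases i with
      | zero =>
        have : u ∈ ([] : List (Int × Int)) := (hFs u).mpr
          ⟨show reach n m u 0 u from rfl, fun t ht => absurd ht (Nat.not_lt_zero t)⟩
        cases this
      | succ i' =>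
        have hstab : ∀ p, reach n m u (i'+1) p → reach n m u i' p := by
          intro p hp
          by_contra hnp
          have hex : exactAt n m u (i'+1) p :=
            ⟨hp, fun t ht hrt => hnp (reach_mono n m u p hrt (by omega))⟩
          exact absurd ((hFs p).mpr hex) List.not_mem_nil
        have h1 : reach n m u i' v := reach_stable n m u i' hstab D v hD
        exact hNoMeet v ⟨reach_mono n m u v h1 (Nat.le_succ i'),
          reach_mono n m v v (show reach n m v 0 v from rfl) (Nat.zero_le j)⟩
    · subst hc
      cases j with
      | zero =>
        have : v ∈ ([] : List (Int × Int)) := (hFe v).mpr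
          ⟨show reach n m v 0 v from rfl, fun t ht => absurd ht (Nat.not_lt_zero t)⟩
        cases this
      | succ j' =>
        have hstab : ∀ p, reach n m v (j'+1) p → reach n m v j' p := by
          intro p hp
          by_contra hnp
          have hex : exactAt n m v (j'+1) p :=
            ⟨hp, fun t ht hrt => hnp (reach_mono n m v p hrt (by omega))⟩
          exact absurd ((hFe p).mpr hex) List.not_mem_nil
        have h1 : reach n m v j' u := reach_stable n m v j' hstab D u (reach_rev n m u v D hD)
        exact hNoMeet u ⟨reach_mono n m u u (show reach n m u 0 u from rfl) (Nat.zero_le i),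
          reach_mono n m v u h1 (Nat.le_succ j')⟩
  | case2 Ss Fs Se Fe ds de hc h =>
    intro u v i j hu hv hds hde hSs hFs hSe hFe hNoMeet
    have hval : biLoop n m Ss Fs Se Fe ds de = ds + 1 + de := by
      rw [biLoop, if_neg hc]
      split
      · rfl
      · rename_i heq
        rw [h] at heq
        cases heq
    rw [hval]
    obtain ⟨p, hpS, hinb, ⟨q, hqF, d, hd, hpd⟩, hpE⟩ := expandFront_none n m Se Fs Ss [] h
    have hq := (hFs q).mp hqF
    have hinbq : inbP n m q := by
      rcases reach_inb n m u q hq.1 with h' | h'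
      · rw [h']; exact hu
      · exact h'
    have hrp : reach n m u (i+1) p :=
      Or.inr ⟨q, hq.1, adjK_of_move n m q p d hinbq hinb hd hpd⟩
    have hrvp : reach n m v j p := (hSe p).mp hpE
    have hruv : reach n m u (i+1+j) v :=
      reach_trans n m u p v (i+1) j hrp (reach_rev n m v p j hrvp)
    refine Or.inl ⟨i+1+j, hruv, ?_, by rw [hds, hde]; push_cast; ring⟩
    intro t ht htv
    rcases Nat.le_total t i with hti | hti
    · exact hNoMeet v ⟨reach_mono n m u v htv (by omega),
        reach_mono n m v v (show reach n m v 0 v from rfl) (Nat.zero_le j)⟩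
    · have htv' : reach n m u (i + (t - i)) v := by
        rwa [show i + (t - i) = t by omega]
      obtain ⟨r, hr1, hr2⟩ := reach_split n m u v i (t - i) htv'
      have hr3 : reach n m v (t - i) r := reach_rev n m r v (t - i) hr2
      exact hNoMeet r ⟨hr1, reach_mono n m v r hr3 (by omega)⟩
  | case3 Ss Fs Se Fe ds de hc Ss' Fs' h ih =>
    intro u v i j hu hv hds hde hSs hFs hSe hFe hNoMeet
    have hval : biLoop n m Ss Fs Se Fe ds de = biLoop n m Se Fe Ss' Fs' de (ds + 1) := by
      rw [biLoop, if_neg hc]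
      split
      · rename_i heq
        rw [h] at heq
        cases heq
      · rename_i a b heq
        rw [h] at heq
        cases heq
        rfl
    rw [hval]
    obtain ⟨f1, f2, f3⟩ := expandFront_some n m Se Fs Ss [] Ss' Fs' (by intro p hp; cases hp) h
    have h2' : ∀ p : Int × Int, p ∈ Fs' ↔
        (p ∉ Ss ∧ inbP n m p ∧ ∃ q ∈ Fs, ∃ d ∈ knightDirs, p = (q.1 + d.1, q.2 + d.2)) := by
      intro p
      rw [f2 p]
      simp only [List.not_mem_nil, false_or]
    obtain ⟨hS', hF'⟩ := step_reach n m u hu i Ss Fs Ss' Fs' hSs hFs f1 h2'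
    have hNoMeet' : ∀ p, ¬ (reach n m v j p ∧ reach n m u (i+1) p) := by
      rintro p ⟨hvp, hup⟩
      by_cases hui : reach n m u i p
      · exact hNoMeet p ⟨hui, hvp⟩
      · have hpF : p ∈ Fs' := (hF' p).mpr
          ⟨hup, fun t ht hrt => hui (reach_mono n m u p hrt (by omega))⟩
        exact f3 p hpF List.not_mem_nil ((hSe p).mpr hvp)
    have hds' : ds + 1 = ((i + 1 : Nat) : Int) := by rw [hds]; push_cast; ring
    exact bfsResult_symm n m u v _ (ih v u j (i+1) hv hu hde hds' hSe hFe hS' hF' hNoMeet')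

-- ===== VERDICT (by name: the statement is the Claim_ definition above) =====
theorem solution_spec : Claim_equal_solution := by
  intro board start end_ hdom hpre
  unfold Spec_solution
  obtain ⟨hne, hb1, hb2, hb3, hb4⟩ := hpre
  unfold solution solution_alt
  simp only [pyGetD_zero_headD]
  have hin : 0 ≤ start.1 ∧ start.1 < (board.length : Int) ∧
      0 ≤ start.2 ∧ start.2 < ((board.headD []).length : Int) := ⟨hb1, hb2, hb3, hb4⟩
  -- A's BFS equals the level BFS `bLoop`
  have hset : pySetTrue
      ((List.range (board.length : Int).toNat).map
        (fun _ => (List.range ((board.headD []).length : Int).toNat).map (fun _ => false)))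
      start.1 start.2
      = visSet
        ((List.range (board.length : Int).toNat).map
          (fun _ => (List.range ((board.headD []).length : Int).toNat).map (fun _ => false)))
        start.1 start.2 := by
    unfold pySetTrue visSet
    rw [if_neg (by omega)]
    congr 1
    funext row
    rw [if_neg (by omega)]
  rw [hset]
  have hvis0 : ((List.range (board.length : Int).toNat).map
        (fun _ => (List.range ((board.headD []).length : Int).toNat).map (fun _ => false)))
      = matOf (board.length : Int) ((board.headD []).length : Int) [] := by
    simp [matOf]
  rw [hvis0, show visSet (matOf (board.length : Int) ((board.headD []).length : Int) [])
        start.1 start.2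
      = matOf (board.length : Int) ((board.headD []).length : Int) [(start.1, start.2)] by
    rw [visSet_matOf _ _ _ _ _ hin]; rfl]
  rw [show [(start.1, start.2, (0 : Int))] = enc 0 [(start.1, start.2)] from rfl]
  rw [mainAB]
  -- abbreviations
  rw [if_pos hin]
  have hs : inbP (board.length : Int) ((board.headD []).length : Int) (start.1, start.2) :=
    ⟨hb1, hb2, hb3, hb4⟩
  have hVinit : ∀ p : Int × Int, p ∈ [(start.1, start.2)] ↔
      reach (board.length : Int) ((board.headD []).length : Int) (start.1, start.2) 0 p := by
    intro p
    simp only [List.mem_singleton]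
    exact Iff.rfl
  have hFinit : ∀ p : Int × Int, p ∈ [(start.1, start.2)] ↔
      exactAt (board.length : Int) ((board.headD []).length : Int) (start.1, start.2) 0 p := by
    intro p
    simp only [List.mem_singleton]
    constructor
    · intro h
      exact ⟨h, fun t ht => absurd ht (Nat.not_lt_zero t)⟩
    · exact fun h => h.1
  have hresA := bLoop_correct (board.length : Int) ((board.headD []).length : Int)
    end_.1 end_.2 (start.1, start.2) hs [(start.1, start.2)] [(start.1, start.2)] 0 0
    (by simp) hVinit hFinit (fun t ht => absurd ht (Nat.not_lt_zero t))
  by_cases hse : start = end_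
  · rw [if_pos hse]
    rcases hresA with ⟨D, hr, hmin, he⟩ | ⟨hun, he⟩
    · have hD0 : D = 0 := by
        by_contra hD
        exact hmin 0 (Nat.pos_of_ne_zero hD)
          (show reach _ _ (start.1, start.2) 0 (end_.1, end_.2) by rw [← hse]; rfl)
      rw [he, hD0]
      rfl
    · exact absurd (show reach (board.length : Int) ((board.headD []).length : Int)
        (start.1, start.2) 0 (end_.1, end_.2) by rw [← hse]; rfl) (hun 0)
  · rw [if_neg hse]
    by_cases hein : 0 ≤ end_.1 ∧ end_.1 < (board.length : Int) ∧
        0 ≤ end_.2 ∧ end_.2 < ((board.headD []).length : Int)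
    · rw [if_pos hein]
      have hEinit : ∀ p : Int × Int, p ∈ [(end_.1, end_.2)] ↔
          reach (board.length : Int) ((board.headD []).length : Int) (end_.1, end_.2) 0 p := by
        intro p
        simp only [List.mem_singleton]
        exact Iff.rfl
      have hFeinit : ∀ p : Int × Int, p ∈ [(end_.1, end_.2)] ↔
          exactAt (board.length : Int) ((board.headD []).length : Int) (end_.1, end_.2) 0 p := by
        intro p
        simp only [List.mem_singleton]
        constructor
        · intro h
          exact ⟨h, fun t ht => absurd ht (Nat.not_lt_zero t)⟩
        · exact fun h => h.1
      have hnomeet : ∀ p : Int × Int,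
          ¬ (reach (board.length : Int) ((board.headD []).length : Int) (start.1, start.2) 0 p ∧
             reach (board.length : Int) ((board.headD []).length : Int) (end_.1, end_.2) 0 p) := by
        rintro p ⟨h1, h2⟩
        have e1 : p = (start.1, start.2) := h1
        have e2 : p = (end_.1, end_.2) := h2
        apply hse
        have := e1 ▸ e2
        exact Prod.ext_iff.mpr ⟨congrArg Prod.fst this, congrArg Prod.snd this⟩
      have hresB := biLoop_correct (board.length : Int) ((board.headD []).length : Int)
        (PySem.Set.ofList [(start.1, start.2)]) [(start.1, start.2)]
        (PySem.Set.ofList [(end_.1, end_.2)]) [(end_.1, end_.2)] 0 0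
        (start.1, start.2) (end_.1, end_.2) 0 0 hs hein (by simp) (by simp)
        (by rw [show PySem.Set.ofList [(start.1, start.2)] = [(start.1, start.2)] from rfl]
            exact hVinit)
        hFinit
        (by rw [show PySem.Set.ofList [(end_.1, end_.2)] = [(end_.1, end_.2)] from rfl]
            exact hEinit)
        hFeinit hnomeet
      exact bfsResult_unique _ _ _ _ _ _ hresA hresB
    · rw [if_neg hein]
      rcases hresA with ⟨D, hr, _, he⟩ | ⟨_, he⟩
      · exfalso
        rcases reach_inb _ _ (start.1, start.2) (end_.1, end_.2) hr with h' | h'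
        · apply hse
          exact Prod.ext_iff.mpr ⟨(congrArg Prod.fst h').symm, (congrArg Prod.snd h').symm⟩
        · exact hein h'
      · exact he
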